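-- pv_equiv track=rewrite | github.com/EsraaAbdelrazek/LeetCode | 2659-number-of-even-and-odd-bits/2659-number-of-even-and-odd-bits.py | evenOddBit
-- ===== SOURCE A (Python) =====
-- from typing import List
--
-- def evenOddBit(n: int) -> List[int]:
--
--     bin_num = (bin (n)[2:]) [:: -1]
--     even , odd = 0 , 0
--
--     for i in range (len (bin_num)) :
--         if bin_num [i] == '1' :
--             if i % 2 ==0 :
--                 even +=1
--             else :
--                 odd += 1
--
--     res = [even , odd]
--     return res
-- ===== SOURCE B (Python) =====
-- def evenOddBit(n):
--     m = abs(n)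
--     even = 0
--     odd = 0
--     while m:
--         even += m & 1
--         odd += (m >> 1) & 1
--         m >>= 2
--     return [even, odd]
-- ===== Notes on version B (the rewrite author's own statement) =====
-- stated objective: simpler
-- what changed: B replaces A's build-binary-string / reverse / index-loop with parity branching by a direct arithmetic loop on abs(n) that consumes two bits per iteration via mask-and-shift, never materializing a string.
import Mathlib
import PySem

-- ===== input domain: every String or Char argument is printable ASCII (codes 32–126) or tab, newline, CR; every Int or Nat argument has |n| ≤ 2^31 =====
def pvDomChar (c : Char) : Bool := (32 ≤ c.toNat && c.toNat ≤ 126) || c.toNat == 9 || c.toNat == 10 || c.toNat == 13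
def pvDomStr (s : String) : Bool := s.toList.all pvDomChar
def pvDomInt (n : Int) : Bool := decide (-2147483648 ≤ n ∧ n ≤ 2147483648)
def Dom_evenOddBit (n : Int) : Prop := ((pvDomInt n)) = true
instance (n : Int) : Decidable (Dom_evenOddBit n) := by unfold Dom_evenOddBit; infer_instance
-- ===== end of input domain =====

-- B replaces A's binary-string/reverse/index loop by a two-bits-per-step arithmetic loop; return values proved equal for every Int.

-- ===== PORT A =====
-- bin(m) digits for m : Nat, most significant first (bin(0) = '0')
def pvBinGo (m : Nat) : List Char :=
  if h : m = 0 then []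
  else pvBinGo (m / 2) ++ [if m % 2 == 1 then '1' else '0']
decreasing_by exact Nat.div_lt_self (Nat.pos_of_ne_zero h) (by omega)

def pvBinStr (m : Nat) : List Char := if m = 0 then ['0'] else pvBinGo m

def evenOddBit (n : Int) : List Int :=
  -- bin(n)[2:] is the digits of |n|, with a leading 'b' when n < 0 ('-0b…'[2:])
  let digits := pvBinStr n.natAbs
  let bin_num := (if n < 0 then 'b' :: digits else digits).reverse
  let r := (PySem.List.pyRange 0 (bin_num.length : Int) 1).foldl
    (fun (p : Int × Int) i =>
      if PySem.List.pyGetD bin_num i ' ' == '1' then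
        if i % 2 == 0 then (p.1 + 1, p.2) else (p.1, p.2 + 1)
      else p) (0, 0)
  [r.1, r.2]

-- ===== PORT B =====
def pvLoop (m : Nat) (even odd : Int) : Int × Int :=
  if h : m = 0 then (even, odd)
  else pvLoop (m / 4) (even + ((m % 2 : Nat) : Int)) (odd + ((m / 2 % 2 : Nat) : Int))
decreasing_by exact Nat.div_lt_self (Nat.pos_of_ne_zero h) (by omega)

def evenOddBit_alt (n : Int) : List Int :=
  let r := pvLoop n.natAbs 0 0
  [r.1, r.2]

-- ===== PRECONDITION & SPEC =====
def Spec_evenOddBit (n : Int) (out : List Int) : Prop := out = evenOddBit_alt n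
instance (n : Int) (out : List Int) : Decidable (Spec_evenOddBit n out) := by unfold Spec_evenOddBit; infer_instance

-- ===== CLAIM (what is proved, stated in full; the proofs are below) =====
def Claim_equal_evenOddBit : Prop := ∀ (n : Int), Dom_evenOddBit n → Spec_evenOddBit n (evenOddBit n)

-- ===== LEMMAS AND PROOFS =====

-- structural form of A's index loop: position counter a, accumulators e o
def pvG : List Char → Int → Int → Int → Int × Int
  | [], _, e, o => (e, o)
  | c :: t, a, e, o =>
      if c == '1' then
        if a % 2 == 0 then pvG t (a + 1) (e + 1) o else pvG t (a + 1) e (o + 1)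
      else pvG t (a + 1) e o

-- LSB-first digit list of m
def pvLb (m : Nat) : List Char :=
  if h : m = 0 then []
  else (if m % 2 == 1 then '1' else '0') :: pvLb (m / 2)
decreasing_by exact Nat.div_lt_self (Nat.pos_of_ne_zero h) (by omega)

theorem pvG_range (l : List Char) : ∀ (a : Int) (xs : List Char) (e o : Int),
    0 ≤ a → xs.drop a.toNat = l → a ≤ xs.length →
    (PySem.List.pyRange a (xs.length : Int) 1).foldl
      (fun (p : Int × Int) i =>
        if PySem.List.pyGetD xs i ' ' == '1' then
          if i % 2 == 0 then (p.1 + 1, p.2) else (p.1, p.2 + 1)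
        else p) (e, o) = pvG l a e o := by
  induction l with
  | nil =>
    intro a xs e o ha hdrop hle
    have hlen : xs.length ≤ a.toNat := List.drop_eq_nil_iff.mp hdrop
    have : (xs.length : Int) ≤ a := by omega
    rw [PySem.List.pyRange_one_eq_nil this]
    rfl
  | cons c t ih =>
    intro a xs e o ha hdrop hle
    have hlt : a.toNat < xs.length := by
      have h1 : (xs.drop a.toNat).length = xs.length - a.toNat := List.length_drop
      rw [hdrop] at h1
      simp at h1
      omega
    have hltI : a < (xs.length : Int) := by omega
    have hget : PySem.List.pyGetD xs a ' ' = c := by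
      rw [PySem.List.pyGetD_eq_getElem xs ' ' ha (by exact_mod_cast hltI)]
      have h0 : (xs.drop a.toNat)[0]'(by rw [hdrop]; simp) = c := by
        simp [hdrop]
      rw [List.getElem_drop] at h0
      simpa using h0
    have hdt : xs.drop ((a + 1).toNat) = t := by
      have : (a + 1).toNat = a.toNat + 1 := by omega
      rw [this, ← List.tail_drop, hdrop]
      rfl
    rw [PySem.List.pyRange_one_cons hltI, List.foldl_cons]
    simp only [hget, pvG]
    by_cases hc : c == '1'
    · simp only [hc, if_true]
      by_cases hp : a % 2 == 0
      · simp only [hp, if_true]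
        exact ih (a + 1) xs (e + 1) o (by omega) hdt (by omega)
      · simp only [hp, if_false]
        exact ih (a + 1) xs e (o + 1) (by omega) hdt (by omega)
    · simp only [hc, if_false]
      exact ih (a + 1) xs e o (by omega) hdt (by omega)

theorem pvLb_rev (m : Nat) : (pvBinGo m).reverse = pvLb m := by
  induction m using Nat.strong_induction_on with
  | _ m ih =>
    rw [pvBinGo, pvLb]
    by_cases h : m = 0
    · simp [h]
    · simp only [h, dif_neg, not_false_iff, List.reverse_append, List.reverse_cons,
        List.reverse_nil, List.nil_append, List.singleton_append]
      rw [ih (m / 2) (Nat.div_lt_self (Nat.pos_of_ne_zero h) (by omega))]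

theorem pvG_arg (l : List Char) {x y e o : Int} (h : x = y) : pvG l x e o = pvG l y e o := by
  rw [h]

theorem pvLoop_arg (m : Nat) {e e' o o' : Int} (h1 : e = e') (h2 : o = o') :
    pvLoop m e o = pvLoop m e' o' := by
  rw [h1, h2]

theorem pvG_append (l1 l2 : List Char) : ∀ (a e o : Int),
    pvG (l1 ++ l2) a e o = pvG l2 (a + l1.length) (pvG l1 a e o).1 (pvG l1 a e o).2 := by
  induction l1 with
  | nil => intro a e o; simp [pvG]
  | cons c t ih =>
    intro a e o
    simp only [List.cons_append, pvG, List.length_cons]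
    by_cases hc : c == '1'
    · simp only [hc, if_true]
      by_cases hp : a % 2 == 0
      · simp only [hp, if_true, ih]; apply pvG_arg; push_cast; ring
      · simp only [hp, if_false, ih]; apply pvG_arg; push_cast; ring
    · simp only [hc, if_false, ih]; apply pvG_arg; push_cast; ring

theorem pvG_loop (m : Nat) : ∀ (a e o : Int), a % 2 = 0 →
    pvG (pvLb m) a e o = pvLoop m e o := by
  induction m using Nat.strong_induction_on with
  | _ m ih =>
    intro a e o hpar
    by_cases h : m = 0
    · subst h
      rw [pvLb, pvLoop]
      simp [pvG]
    · have hA : (a % 2 == 0) = true := by simp [hpar]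
      have hA1 : ((a + 1) % 2 == 0) = false := by simp; omega
      have hd : ∀ k : Nat, ((if k % 2 == 1 then '1' else '0') == '1') = (k % 2 == 1) := by
        intro k; by_cases hk : k % 2 = 1 <;> simp [hk]
      by_cases h2 : m / 2 = 0
      · have hm1 : m = 1 := by omega
        subst hm1
        conv_lhs => rw [pvLb, pvLb]
        rw [pvLoop, pvLoop]
        norm_num [pvG, hA]
      · conv_lhs => rw [pvLb, pvLb]
        rw [pvLoop]
        simp only [dif_neg h, dif_neg h2, pvG, hd, hA, hA1, Bool.false_eq_true, if_true, if_false]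
        have hdd : m / 2 / 2 = m / 4 := by omega
        by_cases hm : m % 2 = 1
        · simp only [hm, if_true, beq_self_eq_true]
          by_cases hm2 : m / 2 % 2 = 1
          · simp only [hm2, beq_self_eq_true, if_true]
            rw [hdd, ih (m / 4) (by omega) (a + 1 + 1) (e + 1) (o + 1) (by omega)]
            exact pvLoop_arg _ (by omega) (by omega)
          · have hm2' : (m / 2 % 2 == 1) = false := by simp [hm2]
            simp only [hm2', Bool.false_eq_true, if_false]
            rw [hdd, ih (m / 4) (by omega) (a + 1 + 1) (e + 1) o (by omega)]
            exact pvLoop_arg _ (by omega) (by omega)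
        · have hm' : (m % 2 == 1) = false := by simp [hm]
          simp only [hm', Bool.false_eq_true, if_false]
          by_cases hm2 : m / 2 % 2 = 1
          · simp only [hm2, beq_self_eq_true, if_true]
            rw [hdd, ih (m / 4) (by omega) (a + 1 + 1) e (o + 1) (by omega)]
            exact pvLoop_arg _ (by omega) (by omega)
          · have hm2' : (m / 2 % 2 == 1) = false := by simp [hm2]
            simp only [hm2', Bool.false_eq_true, if_false]
            rw [hdd, ih (m / 4) (by omega) (a + 1 + 1) e o (by omega)]
            exact pvLoop_arg _ (by omega) (by omega)

theorem pvG_rev_binstr (m : Nat) : pvG (pvBinStr m).reverse 0 0 0 = pvLoop m 0 0 := by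
  by_cases h : m = 0
  · subst h
    rw [pvBinStr, pvLoop]
    simp [pvG]
  · rw [pvBinStr]
    simp only [h, if_neg, not_false_iff]
    rw [pvLb_rev]
    exact pvG_loop m 0 0 0 rfl

theorem evenOddBit_eq (n : Int) : evenOddBit n = evenOddBit_alt n := by
  unfold evenOddBit evenOddBit_alt
  have hfold : ∀ (l : List Char),
      (PySem.List.pyRange 0 (l.length : Int) 1).foldl
        (fun (p : Int × Int) i =>
          if PySem.List.pyGetD l i ' ' == '1' then
            if i % 2 == 0 then (p.1 + 1, p.2) else (p.1, p.2 + 1)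
          else p) (0, 0) = pvG l 0 0 0 := by
    intro l
    exact pvG_range l 0 l 0 0 le_rfl (by simp) (by exact_mod_cast Int.natCast_nonneg l.length)
  by_cases hn : n < 0
  · simp only [if_pos hn, List.reverse_cons, hfold]
    rw [pvG_append]
    have hb : ∀ (a e o : Int), pvG ['b'] a e o = (e, o) := by intro a e o; simp [pvG]
    rw [hb]
    rw [pvG_rev_binstr]
  · simp only [if_neg hn, hfold, pvG_rev_binstr]

-- ===== VERDICT (by name: the statement is the Claim_ definition above) =====
theorem evenOddBit_spec : Claim_equal_evenOddBit := by
  intro n _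
  exact evenOddBit_eq n
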